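-- pv_equiv track=rewrite | github.com/gs11/-advent-of-code-2021 | day05.py | place_vents
-- ===== SOURCE A (Python) =====
-- from typing import Dict, List
--
-- def place_vents(vents: List[List[int]], use_diagonal_vents: bool) -> Dict[int, Dict[int, int]]:
--     map: Dict[int, Dict[int, int]] = {}
--
--     for vent in vents:
--         from_x, from_y, to_x, to_y = vent
--
--         if from_x < to_x:
--             x_step_size = 1
--         elif from_x > to_x:
--             x_step_size = -1
--         else:
--             x_step_size = 0
--
--         if from_y < to_y:
--             y_step_size = 1
--         elif from_y > to_y:
--             y_step_size = -1
--         else: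
--             y_step_size = 0
--
--         x = from_x
--         y = from_y
--
--         if (from_x == to_x or from_y == to_y) or use_diagonal_vents is True:
--             vent_length = max(abs(from_x - to_x), abs(from_y - to_y)) + 1
--             for _ in range(vent_length):
--                 if y not in map:
--                     map[y] = {}
--                 if x not in map[y]:
--                     map[y][x] = 1
--                 else:
--                     map[y][x] += 1
--
--                 x += x_step_size
--                 y += y_step_size
--     return map
-- ===== SOURCE B (Python) =====
-- from typing import Dict, List
--
--
-- def place_vents(vents: List[List[int]], use_diagonal_vents: bool) -> Dict[int, Dict[int, int]]:
--     # Pass 1: enumerate every (x, y) cell touched by a qualifying vent, closed-form.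
--     points = []
--     for vent in vents:
--         from_x, from_y, to_x, to_y = vent
--         if from_x != to_x and from_y != to_y and use_diagonal_vents is not True:
--             continue
--         x_step = (to_x > from_x) - (to_x < from_x)
--         y_step = (to_y > from_y) - (to_y < from_y)
--         n = max(abs(from_x - to_x), abs(from_y - to_y)) + 1
--         points.extend((from_x + i * x_step, from_y + i * y_step) for i in range(n))
--
--     # Pass 2: tally the points.
--     counts: Dict[object, int] = {}
--     for p in points:
--         counts[p] = counts.get(p, 0) + 1
--
--     # Pass 3: lay the tallies out as the nested map[y][x] = count.
--     map: Dict[int, Dict[int, int]] = {}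
--     for (x, y), c in counts.items():
--         map.setdefault(y, {})[x] = c
--     return map
-- ===== Notes on version B (the rewrite author's own statement) =====
-- stated objective: alternative
-- what changed: Replaces the single incremental build loop (stepping x,y and bumping a nested dict per cell) with three differently-shaped passes: enumerate all touched points by a closed-form from+i*step formula, tally them into a flat point counter, then lay the counter out as the nested map.
import Mathlib
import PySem

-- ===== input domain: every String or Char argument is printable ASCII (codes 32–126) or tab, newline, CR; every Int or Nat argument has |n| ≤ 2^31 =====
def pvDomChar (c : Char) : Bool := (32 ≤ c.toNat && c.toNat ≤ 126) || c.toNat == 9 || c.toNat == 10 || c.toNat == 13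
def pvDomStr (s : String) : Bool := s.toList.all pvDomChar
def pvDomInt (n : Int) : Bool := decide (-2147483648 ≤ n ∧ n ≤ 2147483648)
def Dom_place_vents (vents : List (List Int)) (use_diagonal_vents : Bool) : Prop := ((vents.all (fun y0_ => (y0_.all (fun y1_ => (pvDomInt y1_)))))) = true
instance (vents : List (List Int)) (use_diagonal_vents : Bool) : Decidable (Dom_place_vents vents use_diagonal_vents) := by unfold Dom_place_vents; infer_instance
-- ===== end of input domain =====

-- B replaces A's single incremental build loop with three passes (enumerate all touched
-- points closed-form, tally them into a flat point counter, lay the counter out as the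
-- nested map); equivalence of the RETURN value is proved on vents whose rows have length 4.

-- ===== PORT A =====
def pvStep (a b : Int) : Int := if a < b then 1 else if b < a then -1 else 0

def pvBumpA (m : PySem.Dict Int (PySem.Dict Int Int)) (y x : Int) :
    PySem.Dict Int (PySem.Dict Int Int) :=
  let m1 := if m.contains y then m else m.insert y PySem.Dict.empty
  let row := m1.getD y PySem.Dict.empty
  let row1 := if row.contains x then row.insert x (row.getD x 0 + 1) else row.insert x 1
  m1.insert y row1

def pvALoop (n : Nat) (x y sx sy : Int) (m : PySem.Dict Int (PySem.Dict Int Int)) :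
    PySem.Dict Int (PySem.Dict Int Int) :=
  match n with
  | 0 => m
  | Nat.succ k => pvALoop k (x + sx) (y + sy) sx sy (pvBumpA m y x)

def pvVentA (use_diagonal_vents : Bool) (m : PySem.Dict Int (PySem.Dict Int Int))
    (vent : List Int) : PySem.Dict Int (PySem.Dict Int Int) :=
  match vent with
  | [from_x, from_y, to_x, to_y] =>
    let sx := pvStep from_x to_x
    let sy := pvStep from_y to_y
    if (from_x == to_x || from_y == to_y) || use_diagonal_vents then
      pvALoop (max (from_x - to_x).natAbs (from_y - to_y).natAbs + 1) from_x from_y sx sy m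
    else m
  | _ => m

def place_vents (vents : List (List Int)) (use_diagonal_vents : Bool) :
    List (Int × List (Int × Int)) :=
  let m := vents.foldl (pvVentA use_diagonal_vents) PySem.Dict.empty
  m.items.map (fun p => (p.1, p.2.items))

-- ===== PORT B =====
def pvPointsOf (from_x from_y to_x to_y : Int) : List (Int × Int) :=
  let x_step := (if from_x < to_x then (1 : Int) else 0) - (if to_x < from_x then (1 : Int) else 0)
  let y_step := (if from_y < to_y then (1 : Int) else 0) - (if to_y < from_y then (1 : Int) else 0)
  (List.range (max (from_x - to_x).natAbs (from_y - to_y).natAbs + 1)).map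
    (fun (i : Nat) => (from_x + (i : Int) * x_step, from_y + (i : Int) * y_step))

-- map.setdefault(y, {})[x] = c
def pvStep2 (m : PySem.Dict Int (PySem.Dict Int Int)) (e : (Int × Int) × Int) :
    PySem.Dict Int (PySem.Dict Int Int) :=
  let m1 := m.setdefault e.1.2 PySem.Dict.empty
  m1.insert e.1.2 ((m1.getD e.1.2 PySem.Dict.empty).insert e.1.1 e.2)

def pvVentB (use_diagonal_vents : Bool) (acc : List (Int × Int)) (vent : List Int) :
    List (Int × Int) :=
  match vent with
  | [from_x, from_y, to_x, to_y] =>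
    if from_x != to_x && from_y != to_y && !use_diagonal_vents then acc
    else acc ++ pvPointsOf from_x from_y to_x to_y
  | _ => acc

def place_vents_alt (vents : List (List Int)) (use_diagonal_vents : Bool) :
    List (Int × List (Int × Int)) :=
  let points := vents.foldl (pvVentB use_diagonal_vents) []
  let counts := points.foldl (fun d p => d.insert p (d.getD p 0 + 1)) PySem.Dict.empty
  let m := counts.items.foldl pvStep2 PySem.Dict.empty
  m.items.map (fun p => (p.1, p.2.items))

-- ===== PRECONDITION & SPEC =====
-- Pre_ excludes vents rows that are not 4 ints long: Python's unpack raises ValueError there.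
def Pre_place_vents (vents : List (List Int)) (use_diagonal_vents : Bool) : Prop :=
  ∀ v ∈ vents, v.length = 4
instance (vents : List (List Int)) (use_diagonal_vents : Bool) : Decidable (Pre_place_vents vents use_diagonal_vents) := by unfold Pre_place_vents; infer_instance

def pvWitness_place_vents : List (List Int) × Bool := ([[0, 0, 2, 0], [1, 0, 1, 2], [2, 2, 0, 0]], true)

def Spec_place_vents (vents : List (List Int)) (use_diagonal_vents : Bool) (out : List (Int × List (Int × Int))) : Prop := out = place_vents_alt vents use_diagonal_vents
instance (vents : List (List Int)) (use_diagonal_vents : Bool) (out : List (Int × List (Int × Int))) : Decidable (Spec_place_vents vents use_diagonal_vents out) := by unfold Spec_place_vents; infer_instance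

-- ===== CLAIM (what is proved, stated in full; the proofs are below) =====
def Claim_equal_place_vents : Prop := ∀ (vents : List (List Int)) (use_diagonal_vents : Bool), Dom_place_vents vents use_diagonal_vents → Pre_place_vents vents use_diagonal_vents → Spec_place_vents vents use_diagonal_vents (place_vents vents use_diagonal_vents)

-- ===== LEMMAS AND PROOFS =====

-- 'm[y] exists and has key x' in the nested map
def pvCont2 (m : PySem.Dict Int (PySem.Dict Int Int)) (p : Int × Int) : Bool :=
  (m.getD p.2 PySem.Dict.empty).contains p.1

-- write count c at cell e.1 (normal form of pvStep2)
def pvPut2 (m : PySem.Dict Int (PySem.Dict Int Int)) (e : (Int × Int) × Int) :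
    PySem.Dict Int (PySem.Dict Int Int) :=
  m.insert e.1.2 ((m.getD e.1.2 PySem.Dict.empty).insert e.1.1 e.2)

-- increment cell p by one (normal form of pvBumpA)
def pvBump (m : PySem.Dict Int (PySem.Dict Int Int)) (p : Int × Int) :
    PySem.Dict Int (PySem.Dict Int Int) :=
  pvPut2 m (p, (m.getD p.2 PySem.Dict.empty).getD p.1 0 + 1)

theorem pvBumpA_eq (m : PySem.Dict Int (PySem.Dict Int Int)) (y x : Int) :
    pvBumpA m y x = pvBump m (x, y) := by
  unfold pvBumpA pvBump pvPut2
  cases hY : m.contains y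
  · simp only [Bool.false_eq_true, if_false]
    rw [PySem.Dict.getD_insert_self, PySem.Dict.insert_insert_self]
    rw [PySem.Dict.getD_of_not_contains m _ hY]
    simp [PySem.Dict.contains_empty, PySem.Dict.getD_empty]
  · simp only [if_true]
    cases hX : (m.getD y PySem.Dict.empty).contains x
    · simp only [Bool.false_eq_true, if_false]
      rw [PySem.Dict.getD_of_not_contains _ _ hX]; norm_num
    · simp

theorem pvStep2_eq (m : PySem.Dict Int (PySem.Dict Int Int)) (e : (Int × Int) × Int) :
    pvStep2 m e = pvPut2 m e := by
  unfold pvStep2 pvPut2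
  cases h : m.contains e.1.2
  · rw [PySem.Dict.setdefault_of_not_contains _ _ h]
    dsimp only
    rw [PySem.Dict.getD_insert_self, PySem.Dict.insert_insert_self]
    rw [PySem.Dict.getD_of_not_contains _ _ h]
  · rw [PySem.Dict.setdefault_of_contains _ _ h]

theorem pvInsert_comm_of_contains {κ ν : Type} [BEq κ] [LawfulBEq κ]
    (d : PySem.Dict κ ν) {k k' : κ} (v : ν) (w : ν)
    (hk : d.contains k = true) (hne : (k' == k) = false) :
    (d.insert k v).insert k' w = (d.insert k' w).insert k v := by
  have hkk' : ¬ (k = k') := by intro h; subst h; simp at hne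
  apply PySem.Dict.ext
  cases h' : d.contains k'
  · have h1 : (d.insert k v).contains k' = false := by
      rw [PySem.Dict.contains_insert]; simp [hne, h']
    have h2 : (d.insert k' w).contains k = true := by
      rw [PySem.Dict.contains_insert]; simp [hk]
    rw [PySem.Dict.items_insert_of_not_contains _ _ h1,
        PySem.Dict.items_insert_of_contains _ _ hk,
        PySem.Dict.items_insert_of_contains _ _ h2,
        PySem.Dict.items_insert_of_not_contains _ _ h',
        List.map_append]
    simp [hne]
  · have h1 : (d.insert k v).contains k' = true := by
      rw [PySem.Dict.contains_insert]; simp [h']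
    have h2 : (d.insert k' w).contains k = true := by
      rw [PySem.Dict.contains_insert]; simp [hk]
    rw [PySem.Dict.items_insert_of_contains _ _ h1,
        PySem.Dict.items_insert_of_contains _ _ hk,
        PySem.Dict.items_insert_of_contains _ _ h2,
        PySem.Dict.items_insert_of_contains _ _ h',
        List.map_map, List.map_map]
    apply List.map_congr_left
    intro q _
    simp only [Function.comp, beq_iff_eq]
    by_cases hp : q.1 = k <;> by_cases hp' : q.1 = k' <;> simp_all

theorem pvPairBeq (a b c d : Int) : ((a, b) == (c, d)) = (a == c && b == d) := rfl

theorem pvCont2_put2 (m : PySem.Dict Int (PySem.Dict Int Int)) (e : (Int × Int) × Int)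
    (p : Int × Int) : pvCont2 (pvPut2 m e) p = (p == e.1 || pvCont2 m p) := by
  rcases p with ⟨px, py⟩
  rcases e with ⟨⟨ex, ey⟩, c⟩
  unfold pvCont2 pvPut2
  dsimp only
  rw [PySem.Dict.getD_insert]
  by_cases h : py = ey
  · subst h
    simp [PySem.Dict.contains_insert, pvPairBeq]
  · simp [h, pvPairBeq]

theorem pvContains_of_cont2 (m : PySem.Dict Int (PySem.Dict Int Int)) (p : Int × Int)
    (h : pvCont2 m p = true) : m.contains p.2 = true := by
  by_contra hc
  rw [Bool.not_eq_true] at hc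
  unfold pvCont2 at h
  rw [PySem.Dict.getD_of_not_contains _ _ hc] at h
  simp [PySem.Dict.contains_empty] at h

theorem pvCommute (m : PySem.Dict Int (PySem.Dict Int Int)) (p : Int × Int)
    (e : (Int × Int) × Int) (hne : (e.1 == p) = false) (hc : pvCont2 m p = true) :
    pvPut2 (pvBump m p) e = pvBump (pvPut2 m e) p := by
  rcases p with ⟨px, py⟩
  rcases e with ⟨⟨ex, ey⟩, c⟩
  have hrow : (m.getD py PySem.Dict.empty).contains px = true := hc
  unfold pvBump pvPut2
  dsimp only
  by_cases hy : ey = py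
  · subst hy
    have hx : (ex == px) = false := by
      rw [pvPairBeq] at hne; simpa using hne
    rw [PySem.Dict.getD_insert_self, PySem.Dict.insert_insert_self,
        PySem.Dict.getD_insert_self, PySem.Dict.insert_insert_self]
    rw [PySem.Dict.getD_insert]
    have hxe : ¬ (px = ex) := by
      intro h; subst h; simp at hx
    rw [if_neg hxe]
    rw [pvInsert_comm_of_contains _ _ _ hrow hx]
  · have hy' : ¬ (py = ey) := fun h => hy h.symm
    rw [PySem.Dict.getD_insert, if_neg hy]
    rw [PySem.Dict.getD_insert, if_neg hy']
    have hey : (ey == py) = false := by simp [hy]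
    rw [pvInsert_comm_of_contains _ _ _ (pvContains_of_cont2 m (px, py) hc) hey]

theorem pvFoldl_put2_bump (rest : List ((Int × Int) × Int)) (p : Int × Int) :
    ∀ m, (∀ e ∈ rest, (e.1 == p) = false) → pvCont2 m p = true →
      List.foldl pvPut2 (pvBump m p) rest = pvBump (List.foldl pvPut2 m rest) p := by
  induction rest with
  | nil => intro m _ _; rfl
  | cons e rest ih =>
    intro m hall hc
    simp only [List.foldl_cons]
    rw [pvCommute m p e (hall e (List.mem_cons_self)) hc]
    exact ih (pvPut2 m e) (fun q hq => hall q (List.mem_cons_of_mem _ hq))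
      (by rw [pvCont2_put2]; simp [hc])

theorem pvCont2_foldl_put2 (L : List ((Int × Int) × Int)) (p : Int × Int) :
    ∀ m, pvCont2 (List.foldl pvPut2 m L) p = (decide (p ∈ L.map (·.1)) || pvCont2 m p) := by
  induction L with
  | nil => intro m; simp
  | cons e L ih =>
    intro m
    simp only [List.foldl_cons, List.map_cons, List.mem_cons]
    rw [ih (pvPut2 m e), pvCont2_put2]
    by_cases h : p = e.1
    · simp [h, Bool.or_comm]
    · simp [h, beq_eq_false_iff_ne.mpr h, Bool.or_comm]

theorem pvG (p : Int × Int) (v : Int) (L : List ((Int × Int) × Int)) :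
    ∀ m, (L.map (·.1)).Nodup → (p, v) ∈ L →
      List.foldl pvPut2 m (L.map (fun q => if q.1 == p then (p, v + 1) else q)) =
        pvBump (List.foldl pvPut2 m L) p := by
  induction L with
  | nil => intro m _ h; simp at h
  | cons e L ih =>
    intro m hnd hmem
    simp only [List.map_cons, List.foldl_cons]
    rw [List.map_cons] at hnd
    by_cases he : e.1 = p
    · have hnotin : p ∉ L.map (·.1) := by
        rw [← he]; exact (List.nodup_cons.mp hnd).1
      have he2 : e = (p, v) := by
        rcases List.mem_cons.mp hmem with h | h
        · exact h.symm
        · exact absurd (List.mem_map.mpr ⟨(p, v), h, rfl⟩) hnotin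
      subst he2
      rw [if_pos (by simp)]
      have hrest : L.map (fun q => if q.1 == p then (p, v + 1) else q) = L := by
        have := List.map_congr_left (l := L)
          (f := fun q => if q.1 == p then (p, v + 1) else q) (g := id)
          (fun q hq => by
            have : q.1 ≠ p := fun hq1 => hnotin (List.mem_map.mpr ⟨q, hq, hq1⟩)
            simp [this])
        simpa using this
      rw [hrest]
      have hput : pvPut2 m (p, v + 1) = pvBump (pvPut2 m (p, v)) p := by
        unfold pvBump pvPut2
        dsimp only
        rw [PySem.Dict.getD_insert_self, PySem.Dict.getD_insert_self,
            PySem.Dict.insert_insert_self, PySem.Dict.insert_insert_self]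
      rw [hput]
      exact pvFoldl_put2_bump L p (pvPut2 m (p, v))
        (fun q hq => beq_eq_false_iff_ne.mpr
          (fun hq1 => hnotin (List.mem_map.mpr ⟨q, hq, hq1⟩)))
        (by rw [pvCont2_put2]; simp)
    · rw [if_neg (by simp [he])]
      have hmem' : (p, v) ∈ L := by
        rcases List.mem_cons.mp hmem with h | h
        · exact absurd (congrArg Prod.fst h.symm) he
        · exact h
      exact ih (pvPut2 m e) (List.nodup_cons.mp hnd).2 hmem'

theorem pvK (c : PySem.Dict (Int × Int) Int) (p : Int × Int) (hn : c.keys.Nodup) :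
    List.foldl pvPut2 PySem.Dict.empty ((c.modify p 0 (· + 1)).items) =
      pvBump (List.foldl pvPut2 PySem.Dict.empty c.items) p := by
  have hmod : c.modify p 0 (· + 1) = c.insert p (c.getD p 0 + 1) := rfl
  rw [hmod]
  cases hc : c.contains p
  · rw [PySem.Dict.items_insert_of_not_contains _ _ hc,
        PySem.Dict.getD_of_not_contains _ _ hc]
    rw [List.foldl_append]
    simp only [List.foldl_cons, List.foldl_nil]
    have hzero :
        pvCont2 (List.foldl pvPut2 PySem.Dict.empty c.items) p = false := by
      rw [pvCont2_foldl_put2]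
      have h1 : decide (p ∈ c.items.map (·.1)) = false := by
        have := PySem.Dict.contains_eq_decide_mem_keys c p
        rw [hc] at this
        exact this.symm
      rw [h1]
      simp [pvCont2, PySem.Dict.getD_empty, PySem.Dict.contains_empty]
    unfold pvBump
    unfold pvCont2 at hzero
    rw [PySem.Dict.getD_of_not_contains _ _ hzero]
  · have hsome : ∃ v, c.get? p = some v := by
      have := PySem.Dict.contains_eq_isSome_get? c p
      rw [hc] at this
      exact Option.isSome_iff_exists.mp this.symm
    obtain ⟨v, hv⟩ := hsome
    have hgd : c.getD p 0 = v := by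
      rw [PySem.Dict.getD_eq_get?_getD, hv]; rfl
    have hmem : (p, v) ∈ c.items := PySem.Dict.mem_items_of_get?_eq_some c hv
    rw [PySem.Dict.items_insert_of_contains _ _ hc, hgd]
    exact pvG p v c.items PySem.Dict.empty hn hmem

theorem pvCore (pts : List (Int × Int)) :
    List.foldl pvPut2 PySem.Dict.empty (PySem.Dict.counter pts).items =
      List.foldl pvBump PySem.Dict.empty pts := by
  induction pts using List.reverseRecOn with
  | nil => rfl
  | append_singleton pts p ih =>
    rw [PySem.Dict.counter_append_singleton, List.foldl_append]
    simp only [List.foldl_cons, List.foldl_nil]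
    rw [pvK _ _ (PySem.Dict.nodup_keys_counter pts), ih]

theorem pvALoop_eq (n : Nat) : ∀ (x y sx sy : Int) m,
    pvALoop n x y sx sy m =
      ((List.range n).map (fun (i : Nat) => (x + (i : Int) * sx, y + (i : Int) * sy))).foldl pvBump m := by
  induction n with
  | zero => intro x y sx sy m; rfl
  | succ k ih =>
    intro x y sx sy m
    show pvALoop k (x + sx) (y + sy) sx sy (pvBumpA m y x) = _
    rw [ih, List.range_succ_eq_map, List.map_cons, List.foldl_cons, List.map_map]
    have hhead : pvBump m (x + ((0 : Nat) : Int) * sx, y + ((0 : Nat) : Int) * sy)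
        = pvBumpA m y x := by
      rw [pvBumpA_eq]; norm_num
    rw [hhead]
    congr 1
    apply List.map_congr_left
    intro i _
    simp only [Function.comp, Nat.succ_eq_add_one, Prod.mk.injEq]
    push_cast
    constructor <;> ring

def pvPts (vent : List Int) (udv : Bool) : List (Int × Int) :=
  match vent with
  | [fx, fy, tx, ty] =>
    if (fx == tx || fy == ty) || udv then pvPointsOf fx fy tx ty else []
  | _ => []

theorem pvA_flat (vents : List (List Int)) (udv : Bool) : ∀ m,
    vents.foldl (pvVentA udv) m =
    List.foldl pvBump m (vents.flatMap (fun v => pvPts v udv)) := by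
  induction vents with
  | nil => intro m; rfl
  | cons v vents ih =>
    intro m
    simp only [List.foldl_cons, List.flatMap_cons, List.foldl_append]
    rw [ih]
    congr 1
    unfold pvVentA
    rcases v with _ | ⟨a, _ | ⟨b, _ | ⟨c, _ | ⟨d, rest⟩⟩⟩⟩
    · rfl
    · rfl
    · rfl
    · rfl
    rcases rest with _ | ⟨e, rest⟩
    · show _ = List.foldl pvBump m (pvPts [a, b, c, d] udv)
      unfold pvPts
      dsimp only
      by_cases hcond : ((a == c || b == d) || udv) = true
      · rw [if_pos hcond, if_pos hcond]
        rw [pvALoop_eq]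
        unfold pvPointsOf
        dsimp only
        congr 1
        apply List.map_congr_left
        intro i _
        have hx : pvStep a c = (if a < c then (1 : Int) else 0) - (if c < a then (1 : Int) else 0) := by
          unfold pvStep; split_ifs <;> omega
        have hy : pvStep b d = (if b < d then (1 : Int) else 0) - (if d < b then (1 : Int) else 0) := by
          unfold pvStep; split_ifs <;> omega
        rw [hx, hy]
      · rw [if_neg hcond, if_neg hcond]
        rfl
    · rfl

theorem pvB_flat (vents : List (List Int)) (udv : Bool) : ∀ acc,
    vents.foldl (pvVentB udv) acc = acc ++ vents.flatMap (fun v => pvPts v udv) := by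
  induction vents with
  | nil => intro acc; simp
  | cons v vents ih =>
    intro acc
    simp only [List.foldl_cons, List.flatMap_cons]
    rw [ih, ← List.append_assoc]
    congr 1
    unfold pvVentB
    rcases v with _ | ⟨a, _ | ⟨b, _ | ⟨c, _ | ⟨d, rest⟩⟩⟩⟩
    · simp [pvPts]
    · simp [pvPts]
    · simp [pvPts]
    · simp [pvPts]
    rcases rest with _ | ⟨e, rest⟩
    · show _ = acc ++ pvPts [a, b, c, d] udv
      unfold pvPts
      dsimp only
      have hneg : (a != c && b != d && !udv) = !((a == c || b == d) || udv) := by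
        cases h1 : a == c <;> cases h2 : b == d <;> cases udv <;> simp [bne, h1, h2]
      rw [hneg]
      by_cases hcond : ((a == c || b == d) || udv) = true
      · rw [hcond]; simp
      · rw [Bool.not_eq_true] at hcond
        rw [hcond]; simp
    · simp [pvPts]

-- ===== VERDICT (by name: the statement is the Claim_ definition above) =====
theorem place_vents_spec : Claim_equal_place_vents := by
  intro vents udv _ _
  unfold Spec_place_vents
  unfold place_vents place_vents_alt
  dsimp only
  rw [pvA_flat vents udv PySem.Dict.empty, pvB_flat vents udv []]
  rw [List.nil_append]
  rw [show pvStep2 = pvPut2 from funext fun m => funext fun e => pvStep2_eq m e]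
  rw [PySem.Dict.foldl_insert_getD_add_one_eq_counter]
  rw [pvCore]
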